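-- pv_equiv track=rewrite | github.com/rossby-sh/romsforge | packages/nipa_auto/src/preprocess/get_gfs.py | select_instant_lines
-- ===== SOURCE A (Python) =====
-- from typing import Any, List, Tuple, Optional
--
-- def grep_lines(lines: List[str], pattern: str) -> List[str]:
--     return [ln for ln in lines if pattern in ln]
--
-- def select_instant_lines(inv_f000: List[str]) -> Tuple[dict, List[str]]:
--     """
--     instant variables from f000 file
--     """
--     pat_u10   = ":UGRD:10 m above ground:"
--     pat_v10   = ":VGRD:10 m above ground:"
--     pat_tair  = ":TMP:2 m above ground:"
--     pat_qair  = ":SPFH:2 m above ground:"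
--     pat_pair  = ":PRMSL:mean sea level:"
--
--     # cloud: prefer total cloud cover entire atmosphere
--     pat_cloud_best = ":TCDC:entire atmosphere:"
--     pat_cloud_any  = ":TCDC:"
--
--     def one(pat: str) -> Optional[str]:
--         lines = grep_lines(inv_f000, pat)
--         return lines[0] if lines else None
--
--     sel = {}
--     sel["u10"]  = one(pat_u10)
--     sel["v10"]  = one(pat_v10)
--     sel["tair"] = one(pat_tair)
--     sel["qair"] = one(pat_qair)
--     sel["pair"] = one(pat_pair)
--
--     cloud = one(pat_cloud_best)
--     if cloud is None:
--         cloud = one(pat_cloud_any)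
--     sel["cloud"] = cloud  # optional
--
--     required = ["u10", "v10", "tair", "qair", "pair"]
--     missing = [k for k in required if sel.get(k) is None]
--     return sel, missing
-- ===== SOURCE B (Python) =====
-- def select_instant_lines(inv_f000):
--     """
--     instant variables from f000 file (single pass over the inventory)
--     """
--     pats = {
--         "u10":  ":UGRD:10 m above ground:",
--         "v10":  ":VGRD:10 m above ground:",
--         "tair": ":TMP:2 m above ground:",
--         "qair": ":SPFH:2 m above ground:",
--         "pair": ":PRMSL:mean sea level:",
--     }
--     found = {k: None for k in pats}
--     cloud_best = None
--     cloud_any = None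
--     for ln in inv_f000:
--         for k, p in pats.items():
--             if found[k] is None and p in ln:
--                 found[k] = ln
--         if cloud_best is None and ":TCDC:entire atmosphere:" in ln:
--             cloud_best = ln
--         if cloud_any is None and ":TCDC:" in ln:
--             cloud_any = ln
--     sel = dict(found)
--     sel["cloud"] = cloud_best if cloud_best is not None else cloud_any
--     missing = [k for k in pats if found[k] is None]
--     return sel, missing
-- ===== Notes on version B (the rewrite author's own statement) =====
-- stated objective: alternative
-- what changed: B makes a single pass over inv_f000 maintaining first-match slots for all seven patterns at once, instead of A's seven separate full scans (one filter per pattern); it trades C-level comprehensions for one explicit loop, so it is not faster in CPython.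
import Mathlib
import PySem

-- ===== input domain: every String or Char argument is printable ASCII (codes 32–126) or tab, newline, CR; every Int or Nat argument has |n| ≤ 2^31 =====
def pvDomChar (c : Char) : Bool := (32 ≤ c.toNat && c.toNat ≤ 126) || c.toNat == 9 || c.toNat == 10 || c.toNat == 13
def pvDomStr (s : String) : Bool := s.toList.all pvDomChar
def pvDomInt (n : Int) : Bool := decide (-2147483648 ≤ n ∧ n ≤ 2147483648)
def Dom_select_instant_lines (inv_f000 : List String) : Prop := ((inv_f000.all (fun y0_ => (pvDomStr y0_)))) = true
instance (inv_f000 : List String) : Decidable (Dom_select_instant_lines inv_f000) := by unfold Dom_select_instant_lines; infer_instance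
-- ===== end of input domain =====

-- B makes ONE pass over inv_f000 maintaining first-match slots for all seven patterns, instead of A's seven separate full scans.

-- ===== PORT A =====
def grep_lines (lines : List String) (pattern : String) : List String :=
  lines.filter (fun ln => PySem.Str.isIn pattern ln)

-- A's helper `one`: first grep-matching line, or None
def pvOne (inv_f000 : List String) (pat : String) : Option String :=
  (grep_lines inv_f000 pat).head?

def select_instant_lines (inv_f000 : List String) : (List (String × Option String)) × List String :=
  let sel : PySem.Dict String (Option String) := PySem.Dict.empty
  let sel := sel.insert "u10"  (pvOne inv_f000 ":UGRD:10 m above ground:")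
  let sel := sel.insert "v10"  (pvOne inv_f000 ":VGRD:10 m above ground:")
  let sel := sel.insert "tair" (pvOne inv_f000 ":TMP:2 m above ground:")
  let sel := sel.insert "qair" (pvOne inv_f000 ":SPFH:2 m above ground:")
  let sel := sel.insert "pair" (pvOne inv_f000 ":PRMSL:mean sea level:")
  let cloud := match pvOne inv_f000 ":TCDC:entire atmosphere:" with
    | none => pvOne inv_f000 ":TCDC:"
    | some c => some c
  let sel := sel.insert "cloud" cloud
  let required := ["u10", "v10", "tair", "qair", "pair"]
  let missing := required.filter (fun k => ((sel.get? k).getD none).isNone)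
  (sel.items, missing)

-- ===== PORT B =====
structure PvSt where
  u10 : Option String
  v10 : Option String
  tair : Option String
  qair : Option String
  pair : Option String
  cbest : Option String
  cany : Option String
deriving DecidableEq, Repr

-- B's per-slot update: fill the slot with the line at the first pattern hit
def pvUpd (p : String) (o : Option String) (ln : String) : Option String :=
  if o.isNone && PySem.Str.isIn p ln then some ln else o

def pvStep (st : PvSt) (ln : String) : PvSt :=
  { u10  := pvUpd ":UGRD:10 m above ground:" st.u10 ln
    v10  := pvUpd ":VGRD:10 m above ground:" st.v10 ln
    tair := pvUpd ":TMP:2 m above ground:" st.tair ln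
    qair := pvUpd ":SPFH:2 m above ground:" st.qair ln
    pair := pvUpd ":PRMSL:mean sea level:" st.pair ln
    cbest := pvUpd ":TCDC:entire atmosphere:" st.cbest ln
    cany := pvUpd ":TCDC:" st.cany ln }

def select_instant_lines_alt (inv_f000 : List String) : (List (String × Option String)) × List String :=
  let st := inv_f000.foldl pvStep ⟨none, none, none, none, none, none, none⟩
  let cloud := if st.cbest.isSome then st.cbest else st.cany
  let found := [("u10", st.u10), ("v10", st.v10), ("tair", st.tair), ("qair", st.qair), ("pair", st.pair)]
  let sel := found ++ [("cloud", cloud)]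
  let missing := (found.filter (fun kv => kv.2.isNone)).map Prod.fst
  (sel, missing)

-- ===== PRECONDITION & SPEC =====
def Spec_select_instant_lines (inv_f000 : List String) (out : (List (String × Option String)) × List String) : Prop := out = select_instant_lines_alt inv_f000
instance (inv_f000 : List String) (out : (List (String × Option String)) × List String) : Decidable (Spec_select_instant_lines inv_f000 out) := by unfold Spec_select_instant_lines; infer_instance

-- ===== CLAIM (what is proved, stated in full; the proofs are below) =====
def Claim_equal_select_instant_lines : Prop := ∀ (inv_f000 : List String), Dom_select_instant_lines inv_f000 → Spec_select_instant_lines inv_f000 (select_instant_lines inv_f000)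

-- ===== LEMMAS AND PROOFS =====

-- once a slot is filled, pvUpd keeps it
lemma pvUpd_some (p : String) (v : String) (ln : String) : pvUpd p (some v) ln = some v := by
  simp [pvUpd]

lemma foldl_pvUpd_some (p : String) (v : String) (ls : List String) :
    ls.foldl (pvUpd p) (some v) = some v := by
  induction ls with
  | nil => rfl
  | cons a l ih => simp [List.foldl, pvUpd_some, ih]

-- the empty-started slot fold computes A's first match
lemma foldl_pvUpd_none (p : String) (ls : List String) :
    ls.foldl (pvUpd p) none = pvOne ls p := by
  induction ls with
  | nil => rfl
  | cons a l ih =>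
    by_cases h : PySem.Chars.isIn p.toList a.toList = true
    · simp [List.foldl, pvUpd, PySem.Str.isIn, h, foldl_pvUpd_some, pvOne, grep_lines, List.filter]
    · simp only [Bool.not_eq_true] at h
      simp [List.foldl, pvUpd, PySem.Str.isIn, h, ih, pvOne, grep_lines, List.filter]

-- the seven slots of B's fold evolve independently
lemma foldl_pvStep (ls : List String) (st : PvSt) :
    ls.foldl pvStep st =
      ⟨ls.foldl (pvUpd ":UGRD:10 m above ground:") st.u10,
       ls.foldl (pvUpd ":VGRD:10 m above ground:") st.v10,
       ls.foldl (pvUpd ":TMP:2 m above ground:") st.tair,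
       ls.foldl (pvUpd ":SPFH:2 m above ground:") st.qair,
       ls.foldl (pvUpd ":PRMSL:mean sea level:") st.pair,
       ls.foldl (pvUpd ":TCDC:entire atmosphere:") st.cbest,
       ls.foldl (pvUpd ":TCDC:") st.cany⟩ := by
  induction ls generalizing st with
  | nil => rfl
  | cons a l ih => simpa [List.foldl] using ih (pvStep st a)

-- ===== VERDICT (by name: the statement is the Claim_ definition above) =====
theorem select_instant_lines_spec : Claim_equal_select_instant_lines := by
  intro inv _
  unfold Spec_select_instant_lines select_instant_lines select_instant_lines_alt
  rw [foldl_pvStep]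
  simp only [foldl_pvUpd_none]
  cases h1 : pvOne inv ":UGRD:10 m above ground:" <;>
  cases h2 : pvOne inv ":VGRD:10 m above ground:" <;>
  cases h3 : pvOne inv ":TMP:2 m above ground:" <;>
  cases h4 : pvOne inv ":SPFH:2 m above ground:" <;>
  cases h5 : pvOne inv ":PRMSL:mean sea level:" <;>
  cases h6 : pvOne inv ":TCDC:entire atmosphere:" <;>
    simp [PySem.Dict.insert, PySem.Dict.empty, PySem.Dict.get?, List.filter]
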